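-- pv_equiv track=rewrite | github.com/kth5711/MTPlayer | bookmarks/open.py | _initial_tile_owners
-- ===== SOURCE A (Python) =====
-- from typing import Optional
--
-- def _initial_tile_owners(
--     grouped_targets: list[tuple[str, list[tuple[str, int, Optional[int], bool]]]],
--     tile_paths: list[str],
-- ) -> dict[int, str]:
--     target_paths = {path for path, _ in grouped_targets}
--     return {
--         index: path
--         for index, path in enumerate(tile_paths)
--         if path and path in target_paths
--     }
-- ===== SOURCE B (Python) =====
-- def _initial_tile_owners(
--     grouped_targets,
--     tile_paths,
-- ):
--     # Inverted traversal: index tile paths once, then walk the (deduplicated)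
--     # target paths and emit every stored tile index; sort by index at the end.
--     path_to_indices = {}
--     for index, path in enumerate(tile_paths):
--         if path:
--             path_to_indices.setdefault(path, []).append(index)
--     owners = {}
--     for target_path in dict.fromkeys(path for path, _ in grouped_targets):
--         for index in path_to_indices.get(target_path, ()):
--             owners[index] = target_path
--     return dict(sorted(owners.items(), key=lambda item: item[0]))
-- ===== Notes on version B (the rewrite author's own statement) =====
-- stated objective: alternative
-- what changed: Instead of filtering one scan over tiles against a target-path set, B builds a path-to-indices index over the tiles once, then iterates over the deduplicated target paths emitting every stored index, and sorts the result by index to restore enumeration order.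
import Mathlib
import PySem

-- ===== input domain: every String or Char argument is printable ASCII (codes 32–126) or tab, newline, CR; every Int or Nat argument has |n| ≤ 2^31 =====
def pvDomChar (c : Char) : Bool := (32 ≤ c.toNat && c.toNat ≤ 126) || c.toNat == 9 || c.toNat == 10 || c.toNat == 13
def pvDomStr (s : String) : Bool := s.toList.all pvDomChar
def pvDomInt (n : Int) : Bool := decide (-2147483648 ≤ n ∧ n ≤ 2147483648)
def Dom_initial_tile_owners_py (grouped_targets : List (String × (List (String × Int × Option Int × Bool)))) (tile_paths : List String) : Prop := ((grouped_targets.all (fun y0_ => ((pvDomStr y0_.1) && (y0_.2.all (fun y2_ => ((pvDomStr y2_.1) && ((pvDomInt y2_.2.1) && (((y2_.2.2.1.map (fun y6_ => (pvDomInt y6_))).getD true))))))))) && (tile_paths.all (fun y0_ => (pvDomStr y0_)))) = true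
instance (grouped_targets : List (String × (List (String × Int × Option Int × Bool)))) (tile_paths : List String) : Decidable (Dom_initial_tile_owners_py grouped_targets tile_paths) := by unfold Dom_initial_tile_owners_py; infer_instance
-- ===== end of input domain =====

-- B inverts the traversal (a tile-path → indices index consumed by the deduplicated target paths,
-- sorted by index at the end) instead of filtering a single scan over tiles; alternative decomposition, same return value.

-- ===== PORT A =====
def initial_tile_owners_py (grouped_targets : List (String × (List (String × Int × Option Int × Bool)))) (tile_paths : List String) : List (Int × String) :=
  let target_paths : PySem.Set String := PySem.Set.ofList (grouped_targets.map (fun g => g.1))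
  ((PySem.List.enumerate tile_paths).foldl
    (fun d x => if x.2 ≠ "" ∧ x.2 ∈ target_paths then d.insert x.1 x.2 else d)
    PySem.Dict.empty).items

-- ===== PORT B =====
def initial_tile_owners_py_alt (grouped_targets : List (String × (List (String × Int × Option Int × Bool)))) (tile_paths : List String) : List (Int × String) :=
  let path_to_indices : PySem.Dict String (List Int) :=
    (PySem.List.enumerate tile_paths).foldl
      (fun d x => if x.2 ≠ "" then d.modify x.2 [] (fun s => s ++ [x.1]) else d)
      PySem.Dict.empty
  let owners : PySem.Dict Int String :=
    (PySem.List.dedup (grouped_targets.map (fun g => g.1))).foldl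
      (fun d q => (path_to_indices.getD q []).foldl (fun d i => d.insert i q) d)
      PySem.Dict.empty
  PySem.List.sorted owners.items (fun x => x.1)

-- ===== PRECONDITION & SPEC =====
def Spec_initial_tile_owners_py (grouped_targets : List (String × (List (String × Int × Option Int × Bool)))) (tile_paths : List String) (out : List (Int × String)) : Prop := out = initial_tile_owners_py_alt grouped_targets tile_paths
instance (grouped_targets : List (String × (List (String × Int × Option Int × Bool)))) (tile_paths : List String) (out : List (Int × String)) : Decidable (Spec_initial_tile_owners_py grouped_targets tile_paths out) := by unfold Spec_initial_tile_owners_py; infer_instance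

-- ===== CLAIM (what is proved, stated in full; the proofs are below) =====
def Claim_equal_initial_tile_owners_py : Prop := ∀ (grouped_targets : List (String × (List (String × Int × Option Int × Bool)))) (tile_paths : List String), Dom_initial_tile_owners_py grouped_targets tile_paths → Spec_initial_tile_owners_py grouped_targets tile_paths (initial_tile_owners_py grouped_targets tile_paths)

-- ===== LEMMAS AND PROOFS =====

-- A's conditional dict-comprehension loop over strictly fst-increasing pairs appends exactly the filtered pairs.
lemma pvItemsA (tgt : PySem.Set String) :
    ∀ (l : List (Int × String)) (d : PySem.Dict Int String),
      List.Pairwise (fun a b => a.1 < b.1) l →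
      (∀ x ∈ l, d.contains x.1 = false) →
      (l.foldl (fun d x => if x.2 ≠ "" ∧ x.2 ∈ tgt then d.insert x.1 x.2 else d) d).items
        = d.items ++ l.filter (fun x => decide (x.2 ≠ "" ∧ x.2 ∈ tgt)) := by
  intro l
  induction l with
  | nil => intro d _ _; simp
  | cons a l ih =>
    intro d hp hfresh
    have hlt : ∀ x ∈ l, a.1 < x.1 := fun x hx => List.rel_of_pairwise_cons hp hx
    by_cases hc : a.2 ≠ "" ∧ a.2 ∈ tgt
    · have hfa : d.contains a.1 = false := hfresh a List.mem_cons_self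
      have h1 : ∀ x ∈ l, (d.insert a.1 a.2).contains x.1 = false := by
        intro x hx
        rw [PySem.Dict.contains_insert]
        have hne : x.1 ≠ a.1 := by have := hlt x hx; omega
        simp [hne, hfresh x (List.mem_cons_of_mem _ hx)]
      simp only [List.foldl_cons, if_pos hc]
      rw [ih (d.insert a.1 a.2) hp.of_cons h1, PySem.Dict.items_insert, hfa]
      simp [hc]
    · simp only [List.foldl_cons, if_neg hc]
      rw [ih d hp.of_cons (fun x hx => hfresh x (List.mem_cons_of_mem _ hx))]
      simp [hc]

-- B's indexing loop: what ends up stored under key q.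
lemma pvP2I :
    ∀ (l : List (Int × String)) (d : PySem.Dict String (List Int)) (q : String),
      (l.foldl (fun d x => if x.2 ≠ "" then d.modify x.2 [] (fun s => s ++ [x.1]) else d) d).getD q []
        = d.getD q [] ++ (l.filter (fun x => decide (x.2 = q ∧ q ≠ ""))).map (fun x => x.1) := by
  intro l
  induction l with
  | nil => intro d q; simp
  | cons a l ih =>
    intro d q
    by_cases ha : a.2 = ""
    · have hcf : ¬ (a.2 = q ∧ q ≠ "") := by rintro ⟨h1, h2⟩; exact h2 (by rw [← h1, ha])
      simp only [List.foldl_cons, if_neg (by simp [ha] : ¬ a.2 ≠ "")]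
      rw [ih]
      simp [hcf]
    · simp only [List.foldl_cons, if_pos ha]
      rw [ih]
      by_cases hq : a.2 = q
      · subst hq
        rw [PySem.Dict.getD_modify_self]
        simp [ha]
      · rw [PySem.Dict.getD_modify_of_ne _ _ _ (fun h => hq h.symm)]
        simp [hq]

-- Key absence survives an insert loop over other keys.
lemma pvContainsFold (q : String) :
    ∀ (l : List Int) (d : PySem.Dict Int String) (j : Int),
      d.contains j = false → j ∉ l →
      ((l.foldl (fun d i => d.insert i q) d).contains j = false) := by
  intro l
  induction l with
  | nil => intro d j hd _; simpa using hd
  | cons a l ih =>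
    intro d j hd hj
    simp only [List.foldl_cons]
    refine ih _ j ?_ (fun h => hj (List.mem_cons_of_mem _ h))
    rw [PySem.Dict.contains_insert, hd]
    simp only [Bool.or_false]
    exact beq_eq_false_iff_ne.mpr (fun h => hj (h ▸ List.mem_cons_self))

-- B's owner loop over pairwise-disjoint index groups appends the groups.
lemma pvItemsB (idx : String → List Int) :
    ∀ (S : List String) (d : PySem.Dict Int String),
      (∀ q ∈ S, (idx q).Nodup) →
      List.Pairwise (fun q q' => ∀ i ∈ idx q, i ∉ idx q') S →
      (∀ q ∈ S, ∀ i ∈ idx q, d.contains i = false) →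
      (S.foldl (fun d q => (idx q).foldl (fun d i => d.insert i q) d) d).items
        = d.items ++ S.flatMap (fun q => (idx q).map (fun i => (i, q))) := by
  intro S
  induction S with
  | nil => intro d _ _ _; simp
  | cons q S ih =>
    intro d hnd hdisj hfresh
    have h1 : (List.foldl (fun d a => d.insert ((fun i => i) a) ((fun _ => q) a)) d (idx q)).items
        = d.items ++ (idx q).map (fun a => ((fun i => i) a, (fun _ => q) a)) :=
      PySem.Dict.items_foldl_insert_fresh (idx q) (fun i => i) (fun _ => q) d
        (fun a ha => hfresh q List.mem_cons_self a ha)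
        (by simpa using hnd q List.mem_cons_self)
    simp only [List.foldl_cons]
    rw [ih _ (fun p hp => hnd p (List.mem_cons_of_mem _ hp)) hdisj.of_cons ?_, h1]
    · simp
    · intro p hp i hi
      refine pvContainsFold q (idx q) d i (hfresh p (List.mem_cons_of_mem _ hp) i hi) ?_
      intro hiq
      exact (List.rel_of_pairwise_cons hdisj hp) i hiq hi

-- In a strictly fst-increasing list, members are determined by their first component.
lemma pvFstInj {l : List (Int × String)} (hp : List.Pairwise (fun a b => a.1 < b.1) l) :
    ∀ x ∈ l, ∀ y ∈ l, x.1 = y.1 → x = y := by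
  induction l with
  | nil => intro x hx; simp at hx
  | cons a l ih =>
    intro x hx y hy hxy
    rcases List.mem_cons.mp hx with hx' | hx' <;> rcases List.mem_cons.mp hy with hy' | hy'
    · rw [hx', hy']
    · exfalso; have := List.rel_of_pairwise_cons hp hy'; rw [hx'] at hxy; omega
    · exfalso; have := List.rel_of_pairwise_cons hp hx'; rw [hy'] at hxy; omega
    · exact ih hp.of_cons x hx' y hy' hxy

-- Grouping a list by the distinct values of its second component is a permutation of it.
lemma pvPermGroup :
    ∀ (S : List String) (l : List (Int × String)), S.Nodup →
      (∀ x ∈ l, x.2 ∈ S) →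
      (S.flatMap (fun q => l.filter (fun x => x.2 == q))).Perm l := by
  intro S
  induction S with
  | nil =>
    intro l _ hmem
    cases l with
    | nil => simp
    | cons a l => exact absurd (hmem a List.mem_cons_self) (by simp)
  | cons q S ih =>
    intro l hnd hmem
    obtain ⟨hqS, hS⟩ := List.nodup_cons.mp hnd
    have hrw : ∀ q' ∈ S,
        (l.filter (fun x => !(x.2 == q))).filter (fun x => x.2 == q') = l.filter (fun x => x.2 == q') := by
      intro q' hq'
      rw [List.filter_filter]
      apply List.filter_congr
      intro x _
      have hne : q' ≠ q := fun h => hqS (h ▸ hq')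
      by_cases hx : x.2 = q'
      · simp [hx, hne]
      · simp [hx]
    have hflat : S.flatMap (fun q' => l.filter (fun x => x.2 == q'))
        = S.flatMap (fun q' => (l.filter (fun x => !(x.2 == q))).filter (fun x => x.2 == q')) := by
      rw [List.flatMap_def, List.flatMap_def]
      exact congrArg List.flatten (List.map_congr_left (fun q' hq' => (hrw q' hq').symm))
    have hmem' : ∀ x ∈ l.filter (fun x => !(x.2 == q)), x.2 ∈ S := by
      intro x hx
      obtain ⟨hxl, hxq⟩ := List.mem_filter.mp hx
      rcases List.mem_cons.mp (hmem x hxl) with h | h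
      · exfalso; simp [h] at hxq
      · exact h
    have hperm := ih (l.filter (fun x => !(x.2 == q))) hS hmem'
    have h0 : ((q :: S).flatMap (fun q' => l.filter (fun x => x.2 == q')))
        = l.filter (fun x => x.2 == q) ++ S.flatMap (fun q' => l.filter (fun x => x.2 == q')) := by
      simp [List.flatMap_cons]
    rw [h0, hflat]
    exact (List.Perm.append_left (l.filter (fun x => x.2 == q)) hperm).trans
      (List.filter_append_perm _ l)

-- ===== VERDICT (by name: the statement is the Claim_ definition above) =====
theorem initial_tile_owners_py_spec : Claim_equal_initial_tile_owners_py := by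
  intro gt tp _
  unfold Spec_initial_tile_owners_py
  set tgt : PySem.Set String := PySem.Set.ofList (gt.map (fun g => g.1)) with htgt
  set en : List (Int × String) := PySem.List.enumerate tp with hen
  have hpen : List.Pairwise (fun a b => a.1 < b.1) en := PySem.List.pairwise_lt_enumerate tp 0
  set F : List (Int × String) := en.filter (fun x => decide (x.2 ≠ "" ∧ x.2 ∈ tgt)) with hF
  have hpF : List.Pairwise (fun a b => a.1 < b.1) F := hpen.filter _
  -- A computes F
  have hA : initial_tile_owners_py gt tp = F := by
    show ((en.foldl (fun d x => if x.2 ≠ "" ∧ x.2 ∈ tgt then d.insert x.1 x.2 else d)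
        PySem.Dict.empty)).items = F
    rw [pvItemsA tgt en PySem.Dict.empty hpen (fun x _ => PySem.Dict.contains_empty x.1)]
    rw [show (PySem.Dict.empty : PySem.Dict Int String).items = [] from rfl, List.nil_append]
  -- the per-path index lists B stores
  set idx : String → List Int :=
    fun q => ((en.foldl (fun d x => if x.2 ≠ "" then d.modify x.2 [] (fun s => s ++ [x.1]) else d)
      PySem.Dict.empty).getD q []) with hidx
  have hE : ∀ q, idx q = (en.filter (fun x => decide (x.2 = q ∧ q ≠ ""))).map (fun x => x.1) := by
    intro q
    rw [show idx q = ((en.foldl (fun d x => if x.2 ≠ "" then d.modify x.2 [] (fun s => s ++ [x.1]) else d)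
        PySem.Dict.empty).getD q []) from rfl, pvP2I en PySem.Dict.empty q, PySem.Dict.getD_empty,
      List.nil_append]
  have hmemIdx : ∀ q i, i ∈ idx q → ∃ x ∈ en, x.1 = i ∧ x.2 = q ∧ q ≠ "" := by
    intro q i hi
    rw [hE q] at hi
    obtain ⟨x, hx, hxi⟩ := List.mem_map.mp hi
    obtain ⟨hxen, hxc⟩ := List.mem_filter.mp hx
    simp only [decide_eq_true_eq] at hxc
    exact ⟨x, hxen, hxi, hxc.1, hxc.2⟩
  have hnodupIdx : ∀ q, (idx q).Nodup := by
    intro q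
    rw [hE q]
    have : List.Pairwise (fun a b => a < b) ((en.filter (fun x => decide (x.2 = q ∧ q ≠ ""))).map (fun x => x.1)) :=
      List.pairwise_map.mpr (hpen.filter _)
    exact this.imp (fun h => by omega)
  -- B's owners dict collects the groups over the distinct target paths
  set S : List String := PySem.Set.ofList (gt.map (fun g => g.1)) with hS
  have hSnd : S.Nodup := PySem.Set.nodup_ofList _
  have hdisj : List.Pairwise (fun q q' => ∀ i ∈ idx q, i ∉ idx q') S := by
    refine (List.Pairwise.imp ?_ hSnd)
    intro q q' hne i hi hi'
    obtain ⟨x, hxen, hxi, hxq, -⟩ := hmemIdx q i hi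
    obtain ⟨y, hyen, hyi, hyq, -⟩ := hmemIdx q' i hi'
    have hxy : x = y := pvFstInj hpen x hxen y hyen (by rw [hxi, hyi])
    exact hne (by rw [← hxq, hxy, hyq])
  have hB : initial_tile_owners_py_alt gt tp = PySem.List.sorted
      (S.flatMap (fun q => (idx q).map (fun i => (i, q)))) (fun x => x.1) := by
    show PySem.List.sorted ((PySem.List.dedup (gt.map (fun g => g.1))).foldl
        (fun d q => (idx q).foldl (fun d i => d.insert i q) d) PySem.Dict.empty).items (fun x => x.1) = _
    rw [PySem.List.dedup_eq_ofList, ← hS,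
      pvItemsB idx S PySem.Dict.empty (fun q _ => hnodupIdx q) hdisj
        (fun q _ i _ => PySem.Dict.contains_empty i)]
    simp [PySem.Dict.empty]
  -- each group is the corresponding fiber of F
  have hgroup : ∀ q ∈ S, (idx q).map (fun i => (i, q)) = F.filter (fun x => x.2 == q) := by
    intro q hq
    by_cases hq0 : q = ""
    · subst hq0
      have h1 : idx "" = [] := by
        rw [hE ""]
        simp
      rw [h1]
      simp only [List.map_nil]
      symm
      rw [List.filter_eq_nil_iff]
      intro x hx
      rw [hF] at hx
      obtain ⟨-, hc⟩ := List.mem_filter.mp hx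
      simp only [decide_eq_true_eq] at hc
      simp only [beq_iff_eq]
      exact hc.1
    · have hqtgt : q ∈ tgt := by rw [htgt]; rw [hS] at hq; exact hq
      rw [hE q, List.map_map]
      have h2 : (en.filter (fun x => decide (x.2 = q ∧ q ≠ ""))).map ((fun i => (i, q)) ∘ (fun x => x.1))
          = en.filter (fun x => decide (x.2 = q ∧ q ≠ "")) := by
        rw [List.map_congr_left (g := id) ?_, List.map_id]
        intro x hx
        obtain ⟨-, hc⟩ := List.mem_filter.mp hx
        simp only [decide_eq_true_eq] at hc
        show (x.1, q) = x
        rw [← hc.1]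
      rw [h2, hF, List.filter_filter]
      apply List.filter_congr
      intro x _
      by_cases hx : x.2 = q
      · simp [hx, hq0, hqtgt]
      · simp [hx]
  have hflatF : S.flatMap (fun q => (idx q).map (fun i => (i, q)))
      = S.flatMap (fun q => F.filter (fun x => x.2 == q)) := by
    rw [List.flatMap_def, List.flatMap_def]
    exact congrArg List.flatten (List.map_congr_left hgroup)
  have hmemF : ∀ x ∈ F, x.2 ∈ S := by
    intro x hx
    obtain ⟨-, hc⟩ := List.mem_filter.mp hx
    simp only [decide_eq_true_eq] at hc
    exact hc.2
  have hperm : F.Perm (S.flatMap (fun q => (idx q).map (fun i => (i, q)))) := by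
    rw [hflatF]
    exact (pvPermGroup S F hSnd hmemF).symm
  rw [hA, hB]
  exact (PySem.List.sorted_eq_of_perm_of_pairwise_lt _ F (fun x => x.1) hperm hpF).symm
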